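-- pv_equiv track=rewrite | github.com/hlcr/Leetcode | K_Distinct.py | find_distinct
-- ===== SOURCE A (Python) =====
-- def find_distinct(string, k):
--     if len(string) < k:
--         return []
--
--     char_set = set()
--     char_queue = []
--     result = []
--     for i in range(len(string)):
--         if string[i] in char_set:
--             temp = ''
--             while char_queue and temp != string[i]:
--                 temp = char_queue.pop(0)
--                 char_set.remove(temp)
--         char_queue.append(string[i])
--         char_set.add(string[i])
--
--         if len(char_queue) == k:
--             result.append(''.join(char_queue))
--             char_set.remove(char_queue.pop(0))
--
--     return result
-- ===== SOURCE B (Python) =====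
-- def find_distinct(string, k):
--     if k <= 0 or len(string) < k:
--         return []
--     return [string[s:s + k] for s in range(len(string) - k + 1)
--             if len(set(string[s:s + k])) == k]
-- ===== Notes on version B (the rewrite author's own statement) =====
-- stated objective: simpler
-- what changed: Replaced A's incremental set+queue sliding window (with its catch-up pop loop and post-emission front pop) by a direct brute-force comprehension that rechecks each length-k window with len(set(window)) == k, guarded by k <= 0 or len(string) < k.
import Mathlib
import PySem

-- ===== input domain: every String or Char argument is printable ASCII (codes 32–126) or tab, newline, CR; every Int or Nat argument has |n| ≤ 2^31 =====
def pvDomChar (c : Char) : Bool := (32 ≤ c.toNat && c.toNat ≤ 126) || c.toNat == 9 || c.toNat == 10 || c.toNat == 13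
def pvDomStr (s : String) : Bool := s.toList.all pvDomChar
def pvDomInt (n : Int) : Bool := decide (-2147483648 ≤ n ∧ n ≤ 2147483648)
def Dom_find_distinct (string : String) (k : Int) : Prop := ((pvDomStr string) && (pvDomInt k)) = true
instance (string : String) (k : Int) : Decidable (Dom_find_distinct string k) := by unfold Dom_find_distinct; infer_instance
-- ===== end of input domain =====

-- B replaces A's incremental set+queue sliding window by a plain per-window distinctness recheck (simpler, not faster).

-- ===== PORT A =====
-- the inner 'while char_queue and temp != string[i]: temp = char_queue.pop(0); char_set.remove(temp)' loop;
-- char_set always holds exactly char_queue's characters, so the popped char is always present and remove = discard.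
def popA (c : Char) : List Char → PySem.Set Char → List Char × PySem.Set Char
  | [], cset => ([], cset)
  | t :: q, cset =>
      let cset' := PySem.Set.discard cset t
      if t = c then (q, cset') else popA c q cset'

-- one iteration of A's 'for i in range(len(string))' body; state = (char_set, char_queue, result)
def stepA (k : Int) (st : PySem.Set Char × List Char × List String) (c : Char) :
    PySem.Set Char × List Char × List String :=
  let p := if PySem.Set.contains st.1 c then popA c st.2.1 st.1 else (st.2.1, st.1)
  let q := p.1 ++ [c]
  let cset := PySem.Set.add p.2 c
  if (q.length : Int) = k then
    -- result.append(''.join(char_queue)); char_set.remove(char_queue.pop(0)) — q just got c appended, so it is nonempty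
    (PySem.Set.discard cset q.headI, q.tail, st.2.2 ++ [String.ofList q])
  else (cset, q, st.2.2)

def find_distinct (string : String) (k : Int) : List String :=
  if PySem.Str.len string < k then []
  else (string.toList.foldl (stepA k) (PySem.Set.empty, [], [])).2.2

-- ===== PORT B =====
def find_distinct_alt (string : String) (k : Int) : List String :=
  if k ≤ 0 ∨ PySem.Str.len string < k then []
  else
    ((PySem.List.pyRange 0 (PySem.Str.len string - k + 1) 1).filter
        (fun s => ((PySem.Set.ofList (PySem.Str.slice string (some s) (some (s + k))).toList).length : Int) == k)).map
      (fun s => PySem.Str.slice string (some s) (some (s + k)))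

-- ===== PRECONDITION & SPEC =====
def Spec_find_distinct (string : String) (k : Int) (out : List String) : Prop := out = find_distinct_alt string k
instance (string : String) (k : Int) (out : List String) : Decidable (Spec_find_distinct string k out) := by unfold Spec_find_distinct; infer_instance

-- ===== CLAIM (what is proved, stated in full; the proofs are below) =====
def Claim_equal_find_distinct : Prop := ∀ (string : String) (k : Int), Dom_find_distinct string k → Spec_find_distinct string k (find_distinct string k)

-- ===== LEMMAS AND PROOFS =====

-- the reference value: all distinct-character windows of length K, by start index
def emitted (K : Nat) (t : List Char) : List String :=
  ((List.range (t.length + 1 - K)).filter (fun s => decide ((t.drop s).take K).Nodup)).map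
    (fun s => String.ofList ((t.drop s).take K))

theorem discard_cons_of_not_mem {x : Char} {rest : List Char} (h : x ∉ rest) :
    PySem.Set.discard (x :: rest) x = rest := by
  simp [PySem.Set.discard, List.filter]
  intro a ha
  exact fun hax => h (hax ▸ ha)

theorem popA_spec : ∀ (q1 q2 : List Char) (c : Char), (q1 ++ c :: q2).Nodup →
    popA c (q1 ++ c :: q2) (q1 ++ c :: q2) = (q2, q2) := by
  intro q1
  induction q1 with
  | nil =>
      intro q2 c h
      simp only [List.nil_append] at h ⊢
      have hc : c ∉ q2 := (List.nodup_cons.1 h).1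
      simp [popA, discard_cons_of_not_mem hc]
  | cons x q1 ih =>
      intro q2 c h
      have hx : x ∉ q1 ++ c :: q2 := (List.nodup_cons.1 h).1
      have hxc : x ≠ c := by
        intro hEq; exact hx (hEq ▸ (by simp : c ∈ q1 ++ c :: q2))
      simp only [List.cons_append, popA, discard_cons_of_not_mem hx]
      rw [if_neg hxc]
      exact ih q2 c (List.nodup_cons.1 h).2

theorem emitted_small {K : Nat} {t : List Char} (h : t.length + 1 ≤ K) : emitted K t = [] := by
  have : t.length + 1 - K = 0 := by omega
  simp [emitted, this]

theorem window_stable {t : List Char} {c : Char} {K s : Nat} (h : s + K ≤ t.length) :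
    ((t ++ [c]).drop s).take K = (t.drop s).take K := by
  rw [List.drop_append_of_le_length (by omega)]
  rw [List.take_append_of_le_length (by simp; omega)]

theorem emitted_snoc {K : Nat} {t : List Char} (c : Char) (hK : 1 ≤ K) (h : K ≤ t.length + 1) :
    emitted K (t ++ [c]) =
      emitted K t ++
        (if ((t ++ [c]).drop (t.length + 1 - K)).Nodup
          then [String.ofList ((t ++ [c]).drop (t.length + 1 - K))] else []) := by
  have hlen : (t ++ [c]).length = t.length + 1 := by simp
  have hm : (t ++ [c]).length + 1 - K = (t.length + 1 - K) + 1 := by simp; omega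
  set m := t.length + 1 - K with hmdef
  have hwlen : ((t ++ [c]).drop m).length = K := by simp; omega
  have htake : ((t ++ [c]).drop m).take K = (t ++ [c]).drop m :=
    List.take_of_length_le (by omega)
  unfold emitted
  rw [hm, List.range_succ, List.filter_append, List.map_append]
  congr 1
  · -- windows with start < m are windows of t
    have hcong : ∀ s ∈ List.range m, ((t ++ [c]).drop s).take K = (t.drop s).take K := by
      intro s hs
      exact window_stable (by simp at hs; omega)
    rw [List.filter_congr (by intro s hs; rw [hcong s hs])]
    apply List.map_congr_left
    intro s hs
    exact congrArg _ (hcong s (List.mem_filter.1 hs).1)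
  · -- the new window at start m
    by_cases hnd : ((t ++ [c]).drop m).Nodup
    · simp [htake, hnd]
    · simp [htake, hnd]

theorem ofList_snoc {xs : List Char} {x : Char} :
    PySem.Set.ofList (xs ++ [x]) = PySem.Set.add (PySem.Set.ofList xs) x := by
  simp [PySem.Set.ofList, List.foldl_append]

theorem contains_iff_mem {q : List Char} {c : Char} :
    PySem.Set.contains q c = true ↔ c ∈ q := by
  unfold PySem.Set.contains
  exact List.contains_iff_mem

theorem ofList_contains_iff {xs : List Char} {x : Char} :
    PySem.Set.contains (PySem.Set.ofList xs) x = true ↔ x ∈ xs :=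
  contains_iff_mem.trans (PySem.Set.mem_ofList xs x)

theorem ofList_length_le {xs : List Char} : (PySem.Set.ofList xs).length ≤ xs.length := by
  induction xs using List.reverseRecOn with
  | nil => simp [PySem.Set.ofList, PySem.Set.empty]
  | append_singleton xs x ih =>
      rw [ofList_snoc]
      unfold PySem.Set.add
      split <;> simp <;> omega

theorem ofList_length_eq_iff {xs : List Char} :
    (PySem.Set.ofList xs).length = xs.length ↔ xs.Nodup := by
  induction xs using List.reverseRecOn with
  | nil => simp [PySem.Set.ofList, PySem.Set.empty]
  | append_singleton xs x ih =>
      rw [ofList_snoc]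
      unfold PySem.Set.add
      by_cases hx : x ∈ xs
      · rw [if_pos (ofList_contains_iff.2 hx)]
        constructor
        · intro h
          exfalso
          have hle := ofList_length_le (xs := xs)
          simp at h
          omega
        · intro h
          exact absurd hx (fun hmem => (List.nodup_append.1 h).2.2 x hmem x (by simp) rfl)
      · rw [if_neg (fun hc => hx (ofList_contains_iff.1 hc))]
        simp only [List.length_append, List.length_cons, List.length_nil]
        constructor
        · intro h
          have hnd : xs.Nodup := ih.1 (by omega)
          exact List.nodup_append.2 ⟨hnd, List.nodup_singleton x,
            fun a ha b hb hab => hx (((List.mem_singleton.1 hb) ▸ hab) ▸ ha)⟩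
        · intro h
          have := ih.2 (List.nodup_append.1 h).1
          omega

theorem suffix_of_suffix_le {α : Type} {u v l : List α} (hu : u <:+ l) (hv : v <:+ l)
    (h : u.length ≤ v.length) : u <:+ v := by
  rw [List.suffix_iff_eq_drop] at hu hv
  rw [hv] at h ⊢
  simp at h
  rw [hu, List.suffix_iff_eq_drop]
  simp
  omega

theorem suffix_append_right {α : Type} {x y : List α} (z : List α) (h : x <:+ y) :
    x ++ z <:+ y ++ z := by
  obtain ⟨a, rfl⟩ := h
  exact ⟨a, by simp⟩

-- a step that does not reach queue length K adds no window to 'emitted'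
theorem emitted_no_emit {K : Nat} {t : List Char} {c : Char} {q' : List Char} (hK : 1 ≤ K)
    (hlt : q'.length < K)
    (hjust : q' = t ++ [c] ∨ ∃ p, p ∈ q' ∧ p :: q' <:+ t ++ [c]) :
    emitted K (t ++ [c]) = emitted K t := by
  by_cases hbig : K ≤ t.length + 1
  · rw [emitted_snoc c hK hbig]
    suffices hnd : ¬ ((t ++ [c]).drop (t.length + 1 - K)).Nodup by simp [hnd]
    rcases hjust with hqt | ⟨p, hp, hsuf⟩
    · exfalso
      have : q'.length = t.length + 1 := by rw [hqt]; simp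
      omega
    · intro hnd
      have hdlen : ((t ++ [c]).drop (t.length + 1 - K)).length = K := by simp; omega
      have hsub : p :: q' <:+ (t ++ [c]).drop (t.length + 1 - K) :=
        suffix_of_suffix_le hsuf (List.drop_suffix _ _) (by simp [hdlen]; omega)
      have : (p :: q').Nodup := List.Nodup.sublist hsub.sublist hnd
      exact (List.nodup_cons.1 this).1 hp
  · rw [emitted_small (t := t ++ [c]) (by simp; omega),
        emitted_small (t := t) (by omega)]

-- a step that reaches queue length K appends exactly that window
theorem emitted_emit {K : Nat} {t : List Char} {c : Char} {q' : List Char} (hK : 1 ≤ K)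
    (hsuf : q' <:+ t ++ [c]) (hlen : q'.length = K) (hnd : q'.Nodup) :
    emitted K (t ++ [c]) = emitted K t ++ [String.ofList q'] := by
  have hbig : K ≤ t.length + 1 := by
    have := hsuf.sublist.length_le
    simp at this
    omega
  rw [emitted_snoc c hK hbig]
  have hdrop : (t ++ [c]).drop (t.length + 1 - K) = q' := by
    rw [List.suffix_iff_eq_drop] at hsuf
    rw [hsuf]
    congr 1
    simp
    omega
  rw [hdrop]
  simp [hnd]

theorem add_of_not_mem {q : List Char} {c : Char} (h : c ∉ q) :
    PySem.Set.add q c = q ++ [c] := by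
  unfold PySem.Set.add
  rw [if_neg (fun hc => h (contains_iff_mem.1 hc))]

-- ONE iteration of A's loop preserves the invariant and keeps result = emitted
theorem stepA_spec (k : Int) (K : Nat) (hk : k = (K : Int)) (hK : 1 ≤ K)
    (t q : List Char) (res : List String) (c : Char)
    (hsuf : q <:+ t) (hnd : q.Nodup) (hlen : q.length + 1 ≤ K)
    (hb : q.length + 1 = K ∨ q = t ∨ ∃ p, p ∈ q ∧ p :: q <:+ t)
    (hres : res = emitted K t) :
    ∃ q', stepA k (q, q, res) c = (q', q', emitted K (t ++ [c])) ∧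
      q' <:+ t ++ [c] ∧ q'.Nodup ∧ q'.length + 1 ≤ K ∧
      (q'.length + 1 = K ∨ q' = t ++ [c] ∨ ∃ p, p ∈ q' ∧ p :: q' <:+ t ++ [c]) := by
  by_cases hc : c ∈ q
  · -- the character is in the queue: A pops up to and including its earlier occurrence
    obtain ⟨q1, q2, hqeq⟩ := List.append_of_mem hc
    subst hqeq
    have hcq2suf : c :: q2 <:+ t := (List.suffix_append q1 (c :: q2)).trans hsuf
    have hndc : (c :: q2).Nodup := List.Nodup.sublist (List.suffix_append q1 (c :: q2)).sublist hnd
    have hnd2 : q2.Nodup := (List.nodup_cons.1 hndc).2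
    have hc2 : c ∉ q2 := (List.nodup_cons.1 hndc).1
    have hlt : q2.length + 1 < K := by
      have : q2.length + 1 ≤ (q1 ++ c :: q2).length := by
        simp only [List.length_append, List.length_cons]
        omega
      omega
    have hne : ¬ (((q2 ++ [c]).length : Int) = k) := by
      rw [hk]; simp; omega
    have hq'suf : q2 ++ [c] <:+ t ++ [c] :=
      (suffix_append_right [c] ((List.suffix_cons c q2).trans hcq2suf))
    have hcsuf : c :: (q2 ++ [c]) <:+ t ++ [c] := by
      have := suffix_append_right [c] hcq2suf
      simpa using this
    refine ⟨q2 ++ [c], ?_, hq'suf, ?_, ?_, Or.inr (Or.inr ⟨c, by simp, hcsuf⟩)⟩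
    · show stepA k (q1 ++ c :: q2, q1 ++ c :: q2, res) c = _
      unfold stepA
      rw [if_pos (contains_iff_mem.2 hc)]
      simp only [popA_spec q1 q2 c hnd]
      rw [if_neg hne]
      rw [add_of_not_mem hc2, hres,
        emitted_no_emit hK (by simp; omega) (Or.inr ⟨c, by simp, hcsuf⟩)]
    · exact List.nodup_append.2 ⟨hnd2, List.nodup_singleton c,
        fun a ha b hb' hab => hc2 (((List.mem_singleton.1 hb') ▸ hab) ▸ ha)⟩
    · simp only [List.length_append, List.length_cons, List.length_nil]
      omega
  · -- new character: A just appends it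
    have hndq : (q ++ [c]).Nodup := List.nodup_append.2 ⟨hnd, List.nodup_singleton c,
      fun a ha b hb' hab => hc (((List.mem_singleton.1 hb') ▸ hab) ▸ ha)⟩
    have hq'suf : q ++ [c] <:+ t ++ [c] := suffix_append_right [c] hsuf
    by_cases hEm : q.length + 1 = K
    · -- the queue reaches length K: emit the window and pop its first character
      obtain ⟨h, rest, hsh⟩ : ∃ h rest, q ++ [c] = h :: rest := by
        cases q with
        | nil => exact ⟨c, [], rfl⟩
        | cons a as => exact ⟨a, as ++ [c], rfl⟩
      have hhrest : h ∉ rest := by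
        have := hndq
        rw [hsh] at this
        exact (List.nodup_cons.1 this).1
      have hrestnd : rest.Nodup := by
        have := hndq
        rw [hsh] at this
        exact (List.nodup_cons.1 this).2
      have hrestlen : rest.length + 1 = K := by
        have : (q ++ [c]).length = rest.length + 1 := by rw [hsh]; simp
        simp at this
        omega
      have hrestsuf : rest <:+ t ++ [c] := by
        have h1 : rest <:+ q ++ [c] := by
          rw [hsh]
          exact List.tail_suffix (h :: rest)
        exact h1.trans hq'suf
      refine ⟨rest, ?_, hrestsuf, hrestnd, by omega, Or.inl hrestlen⟩
      show stepA k (q, q, res) c = _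
      unfold stepA
      rw [if_neg (fun hcc => hc (contains_iff_mem.1 hcc))]
      simp only []
      rw [if_pos (by rw [hk]; simp; omega)]
      rw [add_of_not_mem hc, hres,
        emitted_emit hK hq'suf (by simp; omega) hndq, hsh]
      simp [discard_cons_of_not_mem hhrest]
    · -- queue still shorter than K: no window emitted
      have hlt : (q ++ [c]).length < K := by simp; omega
      have hjust : q ++ [c] = t ++ [c] ∨ ∃ p, p ∈ q ++ [c] ∧ p :: (q ++ [c]) <:+ t ++ [c] := by
        rcases hb with hb | hb | ⟨p, hp, hpsuf⟩
        · exact absurd hb hEm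
        · exact Or.inl (by rw [hb])
        · exact Or.inr ⟨p, by simp [hp], by simpa using suffix_append_right [c] hpsuf⟩
      refine ⟨q ++ [c], ?_, hq'suf, hndq, ?_, ?_⟩
      · show stepA k (q, q, res) c = _
        unfold stepA
        rw [if_neg (fun hcc => hc (contains_iff_mem.1 hcc))]
        simp only []
        rw [if_neg (by rw [hk]; simp; omega)]
        rw [add_of_not_mem hc, hres, emitted_no_emit hK hlt hjust]
      · simp only [List.length_append, List.length_cons, List.length_nil]
        omega
      · rcases hjust with hj | ⟨p, hp, hpsuf⟩
        · exact Or.inr (Or.inl hj)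
        · exact Or.inr (Or.inr ⟨p, hp, hpsuf⟩)

theorem foldA_spec (k : Int) (K : Nat) (hk : k = (K : Int)) (hK : 1 ≤ K) :
    ∀ (rest t q : List Char) (res : List String),
      q <:+ t → q.Nodup → q.length + 1 ≤ K →
      (q.length + 1 = K ∨ q = t ∨ ∃ p, p ∈ q ∧ p :: q <:+ t) →
      res = emitted K t →
      (rest.foldl (stepA k) (q, q, res)).2.2 = emitted K (t ++ rest) := by
  intro rest
  induction rest with
  | nil =>
      intro t q res hsuf hnd hlen hb hres
      simpa using hres
  | cons c rest ih =>
      intro t q res hsuf hnd hlen hb hres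
      obtain ⟨q', hstep, hsuf', hnd', hlen', hb'⟩ :=
        stepA_spec k K hk hK t q res c hsuf hnd hlen hb hres
      simp only [List.foldl_cons, hstep]
      have := ih (t ++ [c]) q' (emitted K (t ++ [c])) hsuf' hnd' hlen' hb' rfl
      simpa using this

theorem foldA_nopos (k : Int) (hk : k ≤ 0) :
    ∀ (rest : List Char) (st : PySem.Set Char × List Char × List String),
      (rest.foldl (stepA k) st).2.2 = st.2.2 := by
  intro rest
  induction rest with
  | nil => intro st; rfl
  | cons c rest ih =>
      intro st
      rw [List.foldl_cons, ih]
      unfold stepA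
      have hne : ¬ ((((if PySem.Set.contains st.1 c then popA c st.2.1 st.1
          else (st.2.1, st.1)).1 ++ [c]).length : Int) = k) := by
        intro h
        have : (0:Int) < ((((if PySem.Set.contains st.1 c then popA c st.2.1 st.1
            else (st.2.1, st.1)).1 ++ [c]).length : Int)) := by
          simp
        omega
      simp only [hne, ite_false]

theorem alt_eq_emitted (string : String) (k : Int) (K : Nat) (hk : k = (K : Int)) (hK : 1 ≤ K)
    (hn : K ≤ string.toList.length) :
    find_distinct_alt string k = emitted K string.toList := by
  unfold find_distinct_alt
  rw [if_neg (by unfold PySem.Str.len; rw [hk]; omega)]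
  have harg : PySem.Str.len string - k + 1 = ((string.toList.length + 1 - K : Nat) : Int) := by
    unfold PySem.Str.len
    rw [hk]
    omega
  rw [harg, PySem.List.pyRange_zero_natCast, List.filter_map, List.map_map]
  have hwin : ∀ s : Nat, s + K ≤ string.toList.length →
      PySem.Str.slice string (some (s : Int)) (some ((s : Int) + k)) =
        String.ofList ((string.toList.drop s).take K) := by
    intro s hs
    rw [hk]
    simp [PySem.Str.slice, PySem.List.slice_natCast_add]
  have hcond : ∀ s ∈ List.range (string.toList.length + 1 - K),
      (((PySem.Set.ofList
          (PySem.Str.slice string (some (s : Int)) (some ((s : Int) + k))).toList).length : Int) == k)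
        = decide ((string.toList.drop s).take K).Nodup := by
    intro s hs
    have hsK : s + K ≤ string.toList.length := by
      rw [List.mem_range] at hs
      omega
    rw [hwin s hsK]
    have hwl : ((string.toList.drop s).take K).length = K := by
      rw [List.length_take, List.length_drop]
      omega
    rw [Bool.eq_iff_iff]
    simp only [beq_iff_eq, decide_eq_true_eq, String.toList_ofList, hk, Int.natCast_inj]
    have h := ofList_length_eq_iff (xs := (string.toList.drop s).take K)
    rw [hwl] at h
    exact h
  unfold emitted
  rw [List.filter_congr (fun s hs => by
    simp only [Function.comp_apply]
    exact hcond s hs)]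
  apply List.map_congr_left
  intro s hs
  have hsK : s + K ≤ string.toList.length := by
    have := (List.mem_filter.1 hs).1
    rw [List.mem_range] at this
    omega
  simp only [Function.comp_apply]
  exact hwin s hsK

theorem find_distinct_eq (string : String) (k : Int) :
    find_distinct string k = find_distinct_alt string k := by
  by_cases hk0 : k ≤ 0
  · have hA : find_distinct string k = [] := by
      unfold find_distinct
      rw [if_neg (by unfold PySem.Str.len; omega)]
      exact foldA_nopos k hk0 _ _
    have hB : find_distinct_alt string k = [] := by
      unfold find_distinct_alt
      rw [if_pos (Or.inl hk0)]
    rw [hA, hB]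
  · set K := k.toNat with hKdef
    have hk : k = (K : Int) := by omega
    have hK : 1 ≤ K := by omega
    by_cases hn : PySem.Str.len string < k
    · unfold find_distinct find_distinct_alt
      rw [if_pos hn, if_pos (Or.inr hn)]
    · have hn' : K ≤ string.toList.length := by
        unfold PySem.Str.len at hn; omega
      rw [alt_eq_emitted string k K hk hK hn']
      unfold find_distinct
      rw [if_neg hn]
      have h0 : emitted K ([] : List Char) = [] := emitted_small (by simp only [List.length_nil]; omega)
      have := foldA_spec k K hk hK string.toList [] [] []
        (by simp) (by simp) (by simp only [List.length_nil]; omega) (Or.inr (Or.inl rfl)) h0.symm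
      simpa using this

-- ===== VERDICT (by name: the statement is the Claim_ definition above) =====
theorem find_distinct_spec : Claim_equal_find_distinct := by
  intro string k _
  unfold Spec_find_distinct
  exact find_distinct_eq string k
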